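-- pv_equiv track=rewrite | github.com/ThriceInATrice/advent_of_code_2024 | dec_2nd/dec_2nd.py | step_check
-- ===== SOURCE A (Python) =====
-- def step_check(line, problem_damper):
--     """
--     this function looks at the changes between each element in a given line and returns true if they are
--     all gradually ascending or descending. if the problem damper is greater than 0, it can accept that
--     many problem values in the line, by calling itself recursively on each possible version of a problematic
--     line with a reduced problem damper
--     """
--     steps = [line[i + 1] - line[i] for i in range(len(line) - 1)]
--     if all(0 < step < 4 for step in steps) or all(-4 < step < 0 for step in steps):
--         return True
--     elif problem_damper > 0:
--         return any(
--             step_check(line[:i] + line[i + 1 :], problem_damper - 1)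
--             for i in range(len(line))
--         )
--     else:
--         return False
-- ===== SOURCE B (Python) =====
-- def step_check(line, problem_damper):
--     # Iterative breadth-first search over deduplicated candidate lines, level by
--     # level: level j holds every line reachable by j removals, each exactly once.
--     def safe(xs):
--         steps = [xs[i + 1] - xs[i] for i in range(len(xs) - 1)]
--         return all(0 < s < 4 for s in steps) or all(-4 < s < 0 for s in steps)
--
--     level = [tuple(line)]
--     k = problem_damper
--     while True:
--         if any(safe(xs) for xs in level):
--             return True
--         if k <= 0:
--             return False
--         k -= 1
--         level = list({xs[:i] + xs[i + 1:] for xs in level for i in range(len(xs))})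
-- ===== Notes on version B (the rewrite author's own statement) =====
-- stated objective: alternative
-- what changed: Replaces A's recursive descent over every removal sequence by an iterative level-by-level breadth-first search whose candidate set is deduplicated with a Python set (level j holds each line reachable by j removals exactly once, at most C(n,j) of them, instead of one recursion path per removal sequence).
import Mathlib
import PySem

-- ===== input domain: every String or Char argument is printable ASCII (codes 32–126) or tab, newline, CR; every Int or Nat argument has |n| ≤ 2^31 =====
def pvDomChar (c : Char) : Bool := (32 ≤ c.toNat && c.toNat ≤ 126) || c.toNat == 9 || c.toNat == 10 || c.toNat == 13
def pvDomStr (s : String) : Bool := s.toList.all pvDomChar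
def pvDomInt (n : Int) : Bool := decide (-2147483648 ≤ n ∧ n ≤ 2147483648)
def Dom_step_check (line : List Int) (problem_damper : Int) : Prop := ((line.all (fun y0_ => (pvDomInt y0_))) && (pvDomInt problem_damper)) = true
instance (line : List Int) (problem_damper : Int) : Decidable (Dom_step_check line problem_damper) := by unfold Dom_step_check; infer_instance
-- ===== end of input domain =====

-- B replaces A's recursive descent over every removal sequence by an iterative,
-- deduplicated breadth-first search over candidate lines (objective: alternative).

-- ===== PORT A =====
-- A, literally: the steps list, the two 'all' checks, then 'any' over one-element
-- removals with a reduced damper.  line[:i] / line[i+1:] with 0 ≤ i < len are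
-- exactly take i / drop (i+1); the indices i, i+1 of the comprehension are in range,
-- so getD is exact.
def step_check (line : List Int) (problem_damper : Int) : Bool :=
  let steps := (List.range (line.length - 1)).map (fun i => line.getD (i + 1) 0 - line.getD i 0)
  if (steps.all fun step => 0 < step && step < 4) || (steps.all fun step => -4 < step && step < 0) then
    true
  else if 0 < problem_damper then
    (List.range line.length).any fun i =>
      step_check (line.take i ++ line.drop (i + 1)) (problem_damper - 1)
  else
    false
termination_by problem_damper.toNat
decreasing_by omega

-- ===== PORT B =====
-- Source B's helper 'safe'
def pvSafe (xs : List Int) : Bool :=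
  let steps := (List.range (xs.length - 1)).map (fun i => xs.getD (i + 1) 0 - xs.getD i 0)
  (steps.all fun s => 0 < s && s < 4) || (steps.all fun s => -4 < s && s < 0)

-- Source B's set comprehension: the next (deduplicated) level of candidate lines
-- (the Bool result is order-independent, so the set's iteration order is immaterial)
def pvExpand (level : List (List Int)) : List (List Int) :=
  PySem.Set.ofList (level.flatMap fun xs =>
    (List.range xs.length).map fun i => xs.take i ++ xs.drop (i + 1))

-- Source B's 'while True' loop, with the loop variables (level, k) as arguments
def pvBfs (level : List (List Int)) (k : Int) : Bool :=
  if level.any pvSafe then true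
  else if k ≤ 0 then false
  else pvBfs (pvExpand level) (k - 1)
termination_by k.toNat
decreasing_by omega

def step_check_alt (line : List Int) (problem_damper : Int) : Bool :=
  pvBfs [line] problem_damper

-- ===== PRECONDITION & SPEC =====
def Spec_step_check (line : List Int) (problem_damper : Int) (out : Bool) : Prop := out = step_check_alt line problem_damper
instance (line : List Int) (problem_damper : Int) (out : Bool) : Decidable (Spec_step_check line problem_damper out) := by unfold Spec_step_check; infer_instance

-- ===== CLAIM (what is proved, stated in full; the proofs are below) =====
def Claim_equal_step_check : Prop := ∀ (line : List Int) (problem_damper : Int), Dom_step_check line problem_damper → Spec_step_check line problem_damper (step_check line problem_damper)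

-- ===== LEMMAS AND PROOFS =====

theorem step_check_eq (line : List Int) (k : Int) :
    step_check line k =
      if pvSafe line then true
      else if 0 < k then
        (List.range line.length).any fun i =>
          step_check (line.take i ++ line.drop (i + 1)) (k - 1)
      else false := by
  rw [step_check]; rfl

theorem pvBfs_eq (level : List (List Int)) (k : Int) :
    pvBfs level k =
      if level.any pvSafe then true
      else if k ≤ 0 then false
      else pvBfs (pvExpand level) (k - 1) := by
  rw [pvBfs]

-- membership in the expanded level
theorem mem_pvExpand (level : List (List Int)) (ys : List Int) :
    ys ∈ pvExpand level ↔ ∃ xs ∈ level, ∃ i ∈ List.range xs.length, ys = xs.take i ++ xs.drop (i + 1) := by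
  unfold pvExpand
  simp [PySem.Set.mem_ofList, List.mem_flatMap, eq_comm]

-- loop invariant: pvBfs on a level is 'some member of the level passes step_check'
theorem pvBfs_any (n : Nat) : ∀ (k : Int), k.toNat ≤ n → ∀ (level : List (List Int)),
    pvBfs level k = level.any (fun xs => step_check xs k) := by
  induction n with
  | zero =>
    intro k hk level
    have hk0 : k ≤ 0 := by omega
    have hstep : ∀ xs : List Int, step_check xs k = pvSafe xs := by
      intro xs
      rw [step_check_eq]
      by_cases hs : pvSafe xs <;> simp [hs]; omega
    rw [pvBfs_eq]
    simp only [hstep]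
    cases h : level.any pvSafe
    · simp [hk0]
    · simp
  | succ m ih =>
    intro k hk level
    rw [pvBfs_eq]
    by_cases h : level.any pvSafe = true
    · obtain ⟨xs, hxs, hs⟩ := List.any_eq_true.mp h
      rw [h]
      simp only [if_true]
      rw [eq_comm, List.any_eq_true]
      exact ⟨xs, hxs, by rw [step_check_eq, hs]; simp⟩
    · simp only [Bool.not_eq_true] at h
      rw [h]
      simp only [Bool.false_eq_true, if_false]
      have hnot : ∀ xs ∈ level, pvSafe xs = false := by
        intro xs hxs
        have := List.any_eq_false.mp h xs hxs
        simpa using this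
      by_cases hk0 : k ≤ 0
      · simp only [hk0, if_true]
        rw [eq_comm, List.any_eq_false]
        intro xs hxs
        rw [step_check_eq, hnot xs hxs]
        simp
        omega
      · simp only [hk0, if_false]
        have hkpos : (0 : Int) < k := by omega
        have hstep : ∀ xs ∈ level, step_check xs k =
            (List.range xs.length).any fun i =>
              step_check (xs.take i ++ xs.drop (i + 1)) (k - 1) := by
          intro xs hxs
          rw [step_check_eq, hnot xs hxs]
          simp [hkpos]
        rw [ih (k - 1) (by omega) (pvExpand level)]
        rw [Bool.eq_iff_iff]
        simp only [List.any_eq_true]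
        constructor
        · rintro ⟨ys, hys, hc⟩
          obtain ⟨xs, hxs, i, hi, rfl⟩ := (mem_pvExpand level ys).mp hys
          exact ⟨xs, hxs, by rw [hstep xs hxs]; exact List.any_eq_true.mpr ⟨i, hi, hc⟩⟩
        · rintro ⟨xs, hxs, hc⟩
          rw [hstep xs hxs] at hc
          obtain ⟨i, hi, hc⟩ := List.any_eq_true.mp hc
          exact ⟨_, (mem_pvExpand level _).mpr ⟨xs, hxs, i, hi, rfl⟩, hc⟩

-- ===== VERDICT (by name: the statement is the Claim_ definition above) =====
theorem step_check_spec : Claim_equal_step_check := by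
  intro line k _
  unfold Spec_step_check step_check_alt
  rw [pvBfs_any k.toNat k le_rfl [line]]
  simp
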